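-- pv_equiv track=rewrite | github.com/vojtdaa/Sprog1 | tridici algoritmy/insertion_swap.py | FindSmaller
-- ===== SOURCE A (Python) =====
-- def FindSmaller(n):
--     last_index = len(n)-1
--     gap = 1
--     i = 0
--
--     while last_index - (i+1) * gap >= 0 and n[last_index-i*gap] < n[last_index-(i+1)*gap]:
--         n[last_index-i*gap], n[last_index-(i+1)*gap] = n[last_index-(i+1)*gap], n[last_index-i*gap]
--         i+=1
--
--     return n
-- ===== SOURCE B (Python) =====
-- def FindSmaller(n):
--     # Two-phase: find the insertion index of the last element by a pure scan
--     # (no writes), then rebuild the list with one slice splice.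
--     if not n:
--         return n
--     v = n[-1]
--     p = n[:-1]
--     j = next((k for k in range(len(p), 0, -1) if p[k - 1] <= v), 0)
--     n[:] = p[:j] + [v] + p[j:]
--     return n
-- ===== Notes on version B (the rewrite author's own statement) =====
-- stated objective: alternative
-- what changed: Replaces A's in-place pairwise-swap loop (which moves data while it scans) by a two-phase algorithm: a pure, write-free scan that only computes the insertion index of the last element, followed by a single slice splice p[:j]+[v]+p[j:] that builds the result in one step.
import Mathlib
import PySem

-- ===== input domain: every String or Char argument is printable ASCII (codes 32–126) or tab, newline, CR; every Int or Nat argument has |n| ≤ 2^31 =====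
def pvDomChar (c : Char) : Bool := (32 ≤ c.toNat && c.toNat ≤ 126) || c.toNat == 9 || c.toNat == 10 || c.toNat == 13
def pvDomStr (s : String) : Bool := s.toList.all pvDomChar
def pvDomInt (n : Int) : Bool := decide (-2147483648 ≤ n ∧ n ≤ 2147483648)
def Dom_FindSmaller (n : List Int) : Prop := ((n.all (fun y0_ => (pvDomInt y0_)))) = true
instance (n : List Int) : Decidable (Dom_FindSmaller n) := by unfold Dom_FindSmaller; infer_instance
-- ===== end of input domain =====

-- B replaces A's in-place swap loop by a two-phase algorithm: a pure index-finding
-- scan, then one slice splice (objective: alternative). Both Pythons mutate the list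
-- in place the same way; the theorems are about the return value.

-- ===== PORT A =====
-- A's while loop. All indices touched are in range whenever the loop guard holds
-- (0 ≤ last_index-(i+1) < last_index-i < len), so the total forms pyGetD/pySetD are
-- exact here. fuel = n.length bounds the iterations (the loop runs at most
-- last_index ≤ len-1 times); it does not change the semantics.
def FindSmallerLoop (l : List Int) (lastIndex : Int) (gap : Int) (i : Nat) (fuel : Nat) : List Int :=
  match fuel with
  | 0 => l
  | fuel + 1 =>
    if lastIndex - ((i : Int) + 1) * gap ≥ 0 ∧
        PySem.List.pyGetD l (lastIndex - (i : Int) * gap) 0 <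
          PySem.List.pyGetD l (lastIndex - ((i : Int) + 1) * gap) 0 then
      FindSmallerLoop
        (PySem.List.pySetD
          (PySem.List.pySetD l (lastIndex - (i : Int) * gap)
            (PySem.List.pyGetD l (lastIndex - ((i : Int) + 1) * gap) 0))
          (lastIndex - ((i : Int) + 1) * gap)
          (PySem.List.pyGetD l (lastIndex - (i : Int) * gap) 0))
        lastIndex gap (i + 1) fuel
    else l

def FindSmaller (n : List Int) : List Int :=
  FindSmallerLoop n ((n.length : Int) - 1) 1 0 n.length

-- ===== PORT B =====
-- Source B's generator search: first k in range(len(p), 0, -1) with p[k-1] <= v, else 0.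
-- The counter k is a Nat stepping down by 1; p[k-1] is in range since 0 < k ≤ len p.
def FindSmallerSearch (p : List Int) (v : Int) : Nat → Nat
  | 0 => 0
  | k + 1 => if PySem.List.pyGetD p (k : Int) 0 ≤ v then k + 1 else FindSmallerSearch p v k

-- Source B: if not n: return n; v = n[-1]; p = n[:-1]; j = <search>; return p[:j]+[v]+p[j:].
def FindSmaller_alt (n : List Int) : List Int :=
  if n = [] then n
  else
    let v := PySem.List.pyGetD n (-1) 0
    let p := PySem.List.slice n none (some (-1))
    let j := FindSmallerSearch p v p.length
    PySem.List.slice p none (some (j : Int)) ++ [v] ++ PySem.List.slice p (some (j : Int)) none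

-- ===== PRECONDITION & SPEC =====
def Spec_FindSmaller (n : List Int) (out : List Int) : Prop := out = FindSmaller_alt n
instance (n : List Int) (out : List Int) : Decidable (Spec_FindSmaller n out) := by unfold Spec_FindSmaller; infer_instance

-- ===== CLAIM =====
def Claim_equal_FindSmaller : Prop := ∀ (n : List Int), Dom_FindSmaller n → Spec_FindSmaller n (FindSmaller n)

-- ===== LEMMAS AND PROOFS =====

-- Invariant: with the last element v currently at position m (state p.take m ++ v :: p.drop m)
-- and i = len p - m swaps done, A's loop finishes with v at the search index.
lemma FindSmaller_key : ∀ (m : Nat) (p : List Int) (v : Int) (fuel : Nat),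
    m ≤ p.length → m ≤ fuel →
    FindSmallerLoop (p.take m ++ v :: p.drop m) ((p.length : Int)) 1 (p.length - m) fuel
      = p.take (FindSmallerSearch p v m) ++ v :: p.drop (FindSmallerSearch p v m) := by
  intro m
  induction m with
  | zero =>
    intro p v fuel _ _
    cases fuel with
    | zero => rfl
    | succ f =>
      rw [FindSmallerLoop]
      rw [if_neg ?_]
      · rfl
      · rintro ⟨h1, -⟩
        simp only [mul_one] at h1
        omega
  | succ k ih =>
    intro p v fuel hlt hf
    obtain ⟨f, rfl⟩ : ∃ f, fuel = f + 1 := ⟨fuel - 1, by omega⟩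
    have hk : k < p.length := by omega
    have htk : (p.take k).length = k := by simp; omega
    have hlen : (p.take (k + 1)).length = k + 1 := by simp; omega
    have hsplit : p.take (k + 1) ++ v :: p.drop (k + 1) = p.take k ++ p[k] :: v :: p.drop (k + 1) := by
      rw [List.take_add_one, List.getElem?_eq_getElem hk]
      simp only [Option.toList_some, List.append_assoc, List.singleton_append]
    rw [FindSmallerLoop]
    simp only [mul_one]
    have e1 : (p.length : Int) - ((p.length - (k + 1) : Nat) : Int) = ((k + 1 : Nat) : Int) := by omega
    have e2 : (p.length : Int) - (((p.length - (k + 1) : Nat) : Int) + 1) = ((k : Nat) : Int) := by omega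
    rw [e1, e2]
    have g1 : PySem.List.pyGetD (p.take (k + 1) ++ v :: p.drop (k + 1)) ((k + 1 : Nat) : Int) 0 = v := by
      rw [PySem.List.pyGetD_natCast, List.getD_eq_getElem?_getD, List.getElem?_append_right (by omega),
        hlen]
      simp
    have g2 : PySem.List.pyGetD (p.take (k + 1) ++ v :: p.drop (k + 1)) ((k : Nat) : Int) 0 = p[k] := by
      rw [hsplit, PySem.List.pyGetD_natCast, List.getD_eq_getElem?_getD,
        List.getElem?_append_right (by omega), htk]
      simp
    have gs : PySem.List.pyGetD p ((k : Nat) : Int) 0 = p[k] := by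
      rw [PySem.List.pyGetD_natCast, List.getD_eq_getElem?_getD, List.getElem?_eq_getElem hk]
      rfl
    rw [g1, g2, FindSmallerSearch, gs]
    by_cases hc : v < p[k]
    · rw [if_pos ⟨Int.natCast_nonneg k, hc⟩, if_neg (by omega)]
      have hstate :
          PySem.List.pySetD
            (PySem.List.pySetD (p.take (k + 1) ++ v :: p.drop (k + 1)) ((k + 1 : Nat) : Int) p[k])
            ((k : Nat) : Int) v
          = p.take k ++ v :: p.drop k := by
        rw [hsplit]
        simp only [PySem.List.pySetD_natCast]
        rw [List.set_append, if_neg (by omega), htk]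
        rw [show k + 1 - k = 1 by omega]
        rw [List.set_append, if_neg (by omega), htk]
        rw [Nat.sub_self]
        simp only [List.set_cons_succ, List.set_cons_zero]
        congr 1
        rw [← List.getElem_cons_drop hk]
      rw [hstate]
      have := ih p v f hk.le (by omega)
      rw [show p.length - (k + 1) + 1 = p.length - k by omega]
      exact this
    · rw [if_neg (fun h => hc h.2), if_pos (by omega)]
-- ===== VERDICT =====
theorem FindSmaller_spec : Claim_equal_FindSmaller := by
  intro n _
  unfold Spec_FindSmaller FindSmaller FindSmaller_alt
  by_cases hn : n = []
  · subst hn; rfl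
  · rw [if_neg hn]
    simp only [PySem.List.pyGetD_neg_one _ _ hn, PySem.List.slice_to_neg_one]
    have hrec : n = n.dropLast ++ [n.getLast hn] := (List.dropLast_append_getLast hn).symm
    set p := n.dropLast with hp
    set v := n.getLast hn with hv
    have hlen : n.length = p.length + 1 := by
      rw [hrec]; simp
    have hinit : n = p.take p.length ++ v :: p.drop p.length := by
      simpa using hrec
    have hkey := FindSmaller_key p.length p v n.length le_rfl (by omega)
    simp only [Nat.sub_self] at hkey
    calc FindSmallerLoop n ((n.length : Int) - 1) 1 0 n.length
        = FindSmallerLoop (p.take p.length ++ v :: p.drop p.length) ((p.length : Int)) 1 0 n.length := by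
          rw [← hinit, hlen]; push_cast; ring_nf
      _ = p.take (FindSmallerSearch p v p.length) ++ v :: p.drop (FindSmallerSearch p v p.length) := hkey
      _ = PySem.List.slice p none (some ((FindSmallerSearch p v p.length : Nat) : Int)) ++ [v] ++
            PySem.List.slice p (some ((FindSmallerSearch p v p.length : Nat) : Int)) none := by
          rw [PySem.List.slice_to_natCast, PySem.List.slice_from_natCast]
          simp
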